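-- pv_equiv track=rewrite | github.com/tomatija/Vaja10 | Covid-19.py | zlati_prinasalec
-- ===== SOURCE A (Python) =====
-- def okuzeni(skupine, nosilci):
--     rez = []
--     for okuzen in nosilci:
--         for ljudi in skupine:
--             if okuzen in ljudi:
--                 for x in ljudi:
--                     if x not in rez and x not in nosilci:
--                       rez.append(x)
--     return set(rez)
--
-- def zlati_prinasalec(skupine):
--     vsi = set()
--     for manj_skup in skupine:
--         for ljudi in manj_skup:
--             vsi.add(ljudi)
--
--     slov = {oseba: len(okuzeni(skupine, {oseba})) for oseba in vsi}
--
--     max = 0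
--     index = []
--     for x in slov:
--         if slov[x] > max:
--             max = slov[x]
--             index = [x]
--         elif slov[x] == max:
--             index.append(x)
--
--     index.sort()
--
--     return index[0]
-- ===== SOURCE B (Python) =====
-- def zlati_prinasalec(skupine):
--     neigh = {}
--     for gr in skupine:
--         for p in gr:
--             s = neigh.get(p, set())
--             s.update(x for x in gr if x != p)
--             neigh[p] = s
--     return min(neigh, key=lambda p: (-len(neigh[p]), p))
-- ===== Notes on version B (the rewrite author's own statement) =====
-- stated objective: faster
-- what changed: B builds a person-to-neighbours adjacency dict in a single pass over the groups and returns the keyed min (max degree, then smallest name), instead of A's per-person rescan of all groups (okuzeni) followed by a running-max loop plus sort.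
-- outside the precondition, e.g. on zlati_prinasalec([]): A raises IndexError, B raises ValueError; on zlati_prinasalec([[]]): A raises IndexError, B raises ValueError
import Mathlib
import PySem

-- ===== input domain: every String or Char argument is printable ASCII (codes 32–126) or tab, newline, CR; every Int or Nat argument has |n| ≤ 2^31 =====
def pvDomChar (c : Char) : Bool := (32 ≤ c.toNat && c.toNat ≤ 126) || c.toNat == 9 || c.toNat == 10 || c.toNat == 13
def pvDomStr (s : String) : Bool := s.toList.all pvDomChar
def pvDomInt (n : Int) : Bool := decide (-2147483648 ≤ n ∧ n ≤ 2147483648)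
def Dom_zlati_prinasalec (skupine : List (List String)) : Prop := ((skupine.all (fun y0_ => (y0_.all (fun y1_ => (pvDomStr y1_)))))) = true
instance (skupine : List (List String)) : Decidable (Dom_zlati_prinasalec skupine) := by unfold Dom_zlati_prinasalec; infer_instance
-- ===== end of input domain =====

-- B builds the neighbour sets with a single pass over the groups (a dict person → set of
-- co-group members) instead of re-scanning all groups per person, and picks the best person
-- by a keyed min instead of A's running-max loop plus sort.

-- ===== PORT A =====
def okuzeni (skupine : List (List String)) (nosilci : PySem.Set String) : PySem.Set String :=
  let rez : List String :=
    nosilci.foldl (fun rez okuzen =>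
      skupine.foldl (fun rez ljudi =>
        if okuzen ∈ ljudi then
          ljudi.foldl (fun rez x =>
            if x ∉ rez ∧ x ∉ nosilci then rez ++ [x] else rez) rez
        else rez) rez) []
  PySem.Set.ofList rez

def zlati_prinasalec (skupine : List (List String)) : String :=
  let vsi : PySem.Set String :=
    skupine.foldl (fun vsi manj_skup =>
      manj_skup.foldl (fun vsi ljudi => vsi.add ljudi) vsi) PySem.Set.empty
  let slov : PySem.Dict String Int :=
    vsi.foldl (fun d oseba =>
      d.insert oseba (PySem.Set.len (okuzeni skupine (PySem.Set.ofList [oseba])))) PySem.Dict.empty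
  let st :=
    slov.keys.foldl (fun (st : Int × List String) x =>
      if slov.getD x 0 > st.1 then (slov.getD x 0, [x])
      else if slov.getD x 0 = st.1 then (st.1, st.2 ++ [x])
      else st) (0, [])
  let index := PySem.List.sorted st.2 (fun s => s) false
  (PySem.List.pyGet? index 0).getD ""

-- ===== PORT B =====
def zlati_prinasalec_alt (skupine : List (List String)) : String :=
  let neigh : PySem.Dict String (PySem.Set String) :=
    skupine.foldl (fun d gr =>
      gr.foldl (fun d p =>
        d.modify p PySem.Set.empty
          (fun s => s.update (gr.filter (fun x => x ≠ p)))) d) PySem.Dict.empty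
  (PySem.List.min2? neigh.keys
      (fun p => -(PySem.Set.len (neigh.getD p PySem.Set.empty)))
      (fun p => p)).getD ""

-- ===== PRECONDITION & SPEC =====
-- Pre_ excludes exactly the inputs with no person at all (every group empty): there Python A
-- raises IndexError on index[0] (and B's min raises ValueError).
def Pre_zlati_prinasalec (skupine : List (List String)) : Prop := ∃ g ∈ skupine, g ≠ []
instance (skupine : List (List String)) : Decidable (Pre_zlati_prinasalec skupine) := by
  unfold Pre_zlati_prinasalec; infer_instance

def pvWitness_zlati_prinasalec : List (List String) := [["ana", "bor"], ["bor", "cene"]]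

def Spec_zlati_prinasalec (skupine : List (List String)) (out : String) : Prop := out = zlati_prinasalec_alt skupine
instance (skupine : List (List String)) (out : String) : Decidable (Spec_zlati_prinasalec skupine out) := by unfold Spec_zlati_prinasalec; infer_instance

-- ===== CLAIM (what is proved, stated in full; the proofs are below) =====
def Claim_equal_zlati_prinasalec : Prop := ∀ (skupine : List (List String)), Dom_zlati_prinasalec skupine → Pre_zlati_prinasalec skupine → Spec_zlati_prinasalec skupine (zlati_prinasalec skupine)

-- ===== LEMMAS AND PROOFS =====

-- the semantic notions both proofs are reduced to
def pvOccurs (skupine : List (List String)) (p : String) : Prop := ∃ g ∈ skupine, p ∈ g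
def pvAdj (skupine : List (List String)) (p x : String) : Prop :=
  x ≠ p ∧ ∃ g ∈ skupine, p ∈ g ∧ x ∈ g
def pvCnt (skupine : List (List String)) (p : String) : Int :=
  PySem.Set.len (okuzeni skupine (PySem.Set.ofList [p]))
-- the unique answer both programs return
def pvBest (skupine : List (List String)) (y : String) : Prop :=
  pvOccurs skupine y ∧ ∀ q, pvOccurs skupine q →
    (pvCnt skupine q < pvCnt skupine y ∨ (pvCnt skupine q = pvCnt skupine y ∧ y ≤ q))

theorem pvBest_unique (sk : List (List String)) (r r' : String)
    (h : pvBest sk r) (h' : pvBest sk r') : r = r' := by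
  obtain ⟨ho, hm⟩ := h; obtain ⟨ho', hm'⟩ := h'
  rcases hm r' ho' with h1 | ⟨h1, h2⟩ <;> rcases hm' r ho with h3 | ⟨h3, h4⟩ <;>
    first
      | omega
      | exact absurd h1 (by omega)
      | exact absurd h3 (by omega)
      | exact le_antisymm h2 h4

-- ---- A side : okuzeni ----
theorem A_inner (nosilci g : List String) : ∀ rez : List String, rez.Nodup →
    (g.foldl (fun rez x => if x ∉ rez ∧ x ∉ nosilci then rez ++ [x] else rez) rez).Nodup ∧
    ∀ y, y ∈ g.foldl (fun rez x => if x ∉ rez ∧ x ∉ nosilci then rez ++ [x] else rez) rez ↔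
      (y ∈ rez ∨ (y ∈ g ∧ y ∉ nosilci)) := by
  induction g with
  | nil => intro rez h; simpa using h
  | cons a g ih =>
    intro rez h
    simp only [List.foldl_cons]
    by_cases hc : a ∉ rez ∧ a ∉ nosilci
    · rw [if_pos hc]
      have hnd : (rez ++ [a]).Nodup := by
        rw [List.nodup_append]
        exact ⟨h, List.nodup_singleton a, fun b hb c hc' => by
          simp only [List.mem_cons, List.not_mem_nil, or_false] at hc'
          exact fun hbc => hc.1 ((hbc.trans hc') ▸ hb)⟩
      obtain ⟨h1, h2⟩ := ih (rez ++ [a]) hnd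
      refine ⟨h1, fun y => ?_⟩
      rw [h2 y]
      simp only [List.mem_append, List.mem_cons, List.not_mem_nil, or_false]
      rcases eq_or_ne y a with rfl | hne
      · tauto
      · tauto
    · rw [if_neg hc]
      obtain ⟨h1, h2⟩ := ih rez h
      refine ⟨h1, fun y => ?_⟩
      rw [h2 y]
      simp only [List.mem_cons]
      simp only [not_and, not_not] at hc
      rcases eq_or_ne y a with rfl | hne
      · tauto
      · tauto

theorem A_mid (nosilci : List String) (okuzen : String) (sk : List (List String)) :
    ∀ rez : List String, rez.Nodup →
    (sk.foldl (fun rez ljudi =>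
        if okuzen ∈ ljudi then
          ljudi.foldl (fun rez x => if x ∉ rez ∧ x ∉ nosilci then rez ++ [x] else rez) rez
        else rez) rez).Nodup ∧
    ∀ y, y ∈ sk.foldl (fun rez ljudi =>
        if okuzen ∈ ljudi then
          ljudi.foldl (fun rez x => if x ∉ rez ∧ x ∉ nosilci then rez ++ [x] else rez) rez
        else rez) rez ↔
      (y ∈ rez ∨ ∃ g ∈ sk, okuzen ∈ g ∧ (y ∈ g ∧ y ∉ nosilci)) := by
  induction sk with
  | nil => intro rez h; simpa using h
  | cons g sk ih =>
    intro rez h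
    simp only [List.foldl_cons]
    by_cases hg : okuzen ∈ g
    · rw [if_pos hg]
      obtain ⟨hn1, hm1⟩ := A_inner nosilci g rez h
      obtain ⟨hn2, hm2⟩ := ih _ hn1
      refine ⟨hn2, fun y => ?_⟩
      rw [hm2 y, hm1 y]
      simp only [List.mem_cons]
      constructor
      · rintro ((hy | ⟨hy, hn⟩) | ⟨g', hg', hok, hy, hn⟩)
        · exact Or.inl hy
        · exact Or.inr ⟨g, Or.inl rfl, hg, hy, hn⟩
        · exact Or.inr ⟨g', Or.inr hg', hok, hy, hn⟩
      · rintro (hy | ⟨g', (rfl | hg'), hok, hy, hn⟩)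
        · exact Or.inl (Or.inl hy)
        · exact Or.inl (Or.inr ⟨hy, hn⟩)
        · exact Or.inr ⟨g', hg', hok, hy, hn⟩
    · rw [if_neg hg]
      obtain ⟨hn2, hm2⟩ := ih rez h
      refine ⟨hn2, fun y => ?_⟩
      rw [hm2 y]
      simp only [List.mem_cons]
      constructor
      · rintro (hy | ⟨g', hg', hok, hy, hn⟩)
        · exact Or.inl hy
        · exact Or.inr ⟨g', Or.inr hg', hok, hy, hn⟩
      · rintro (hy | ⟨g', (rfl | hg'), hok, hy, hn⟩)
        · exact Or.inl hy
        · exact absurd hok hg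
        · exact Or.inr ⟨g', hg', hok, hy, hn⟩

theorem okuzeni_spec (sk : List (List String)) (p : String) :
    (okuzeni sk (PySem.Set.ofList [p])).Nodup ∧
    ∀ y, y ∈ okuzeni sk (PySem.Set.ofList [p]) ↔ pvAdj sk p y := by
  have hofl : PySem.Set.ofList [p] = [p] :=
    PySem.Set.ofList_eq_self_of_nodup [p] (List.nodup_singleton p)
  unfold okuzeni
  rw [hofl]
  simp only [List.foldl_cons, List.foldl_nil]
  obtain ⟨hn, hm⟩ := A_mid [p] p sk [] List.nodup_nil
  rw [PySem.Set.ofList_eq_self_of_nodup _ hn]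
  refine ⟨hn, fun y => ?_⟩
  rw [hm y]
  unfold pvAdj
  simp only [List.not_mem_nil, false_or, List.mem_cons, or_false]
  constructor
  · rintro ⟨g, hg, hp, hy, hn'⟩
    exact ⟨fun hcon => hn' (by simp [hcon]), g, hg, hp, hy⟩
  · rintro ⟨hne, g, hg, hp, hy⟩
    exact ⟨g, hg, hp, hy, fun hcon => hne (by simpa using hcon)⟩

-- ---- B side : the adjacency dict ----
theorem B_inner (gr : List String) :
    ∀ (rest : List String) (d : PySem.Dict String (PySem.Set String))
      (K : String → Prop) (V : String → String → Prop),
    d.keys.Nodup →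
    (∀ p, p ∈ d.keys ↔ K p) →
    (∀ p, (d.getD p PySem.Set.empty).Nodup) →
    (∀ p x, x ∈ d.getD p PySem.Set.empty ↔ V p x) →
    ((rest.foldl (fun d p => d.modify p PySem.Set.empty
        (fun s => s.update (gr.filter (fun x => x ≠ p)))) d).keys.Nodup ∧
     (∀ p, p ∈ (rest.foldl (fun d p => d.modify p PySem.Set.empty
        (fun s => s.update (gr.filter (fun x => x ≠ p)))) d).keys ↔ (K p ∨ p ∈ rest)) ∧
     (∀ p, ((rest.foldl (fun d p => d.modify p PySem.Set.empty
        (fun s => s.update (gr.filter (fun x => x ≠ p)))) d).getD p PySem.Set.empty).Nodup) ∧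
     (∀ p x, x ∈ (rest.foldl (fun d p => d.modify p PySem.Set.empty
        (fun s => s.update (gr.filter (fun x => x ≠ p)))) d).getD p PySem.Set.empty ↔
        (V p x ∨ (p ∈ rest ∧ x ∈ gr ∧ x ≠ p)))) := by
  intro rest
  induction rest with
  | nil =>
    intro d K V h1 h2 h3 h4
    refine ⟨h1, fun p => ?_, h3, fun p x => ?_⟩
    · simp only [List.foldl_nil]; rw [h2 p]; simp
    · simp only [List.foldl_nil]; rw [h4 p x]; simp
  | cons p0 rest ih =>
    intro d K V h1 h2 h3 h4
    simp only [List.foldl_cons]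
    have k1 : (d.modify p0 PySem.Set.empty
        (fun s => s.update (gr.filter (fun x => x ≠ p0)))).keys.Nodup := by
      rw [PySem.Dict.keys_modify]; exact PySem.Dict.nodup_keys_insert _ _ _ h1
    have k2 : ∀ p, p ∈ (d.modify p0 PySem.Set.empty
        (fun s => s.update (gr.filter (fun x => x ≠ p0)))).keys ↔ (K p ∨ p = p0) := by
      intro p
      rw [← PySem.Dict.contains_iff_mem_keys, PySem.Dict.contains_modify]
      simp only [Bool.or_eq_true, beq_iff_eq]
      rw [PySem.Dict.contains_iff_mem_keys, h2 p]
      tauto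
    have k3 : ∀ p, ((d.modify p0 PySem.Set.empty
        (fun s => s.update (gr.filter (fun x => x ≠ p0)))).getD p PySem.Set.empty).Nodup := by
      intro p
      rcases eq_or_ne p p0 with rfl | hne
      · rw [PySem.Dict.getD_modify_self]
        exact PySem.Set.nodup_update _ _ (h3 p)
      · rw [PySem.Dict.getD_modify_of_ne _ _ _ hne]; exact h3 p
    have k4 : ∀ p x, x ∈ (d.modify p0 PySem.Set.empty
        (fun s => s.update (gr.filter (fun x => x ≠ p0)))).getD p PySem.Set.empty ↔
        (V p x ∨ (p = p0 ∧ x ∈ gr ∧ x ≠ p)) := by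
      intro p x
      rcases eq_or_ne p p0 with rfl | hne
      · rw [PySem.Dict.getD_modify_self, PySem.Set.mem_update]
        simp only [List.mem_filter, decide_eq_true_eq]
        rw [h4 p x]
        tauto
      · rw [PySem.Dict.getD_modify_of_ne _ _ _ hne, h4 p x]
        simp [hne]
    obtain ⟨r1, r2, r3, r4⟩ := ih _ _ _ k1 k2 k3 k4
    refine ⟨r1, fun p => ?_, r3, fun p x => ?_⟩
    · rw [r2 p]; simp only [List.mem_cons]; tauto
    · rw [r4 p x]; simp only [List.mem_cons]; tauto

theorem B_outer :
    ∀ (rest : List (List String)) (d : PySem.Dict String (PySem.Set String))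
      (K : String → Prop) (V : String → String → Prop),
    d.keys.Nodup →
    (∀ p, p ∈ d.keys ↔ K p) →
    (∀ p, (d.getD p PySem.Set.empty).Nodup) →
    (∀ p x, x ∈ d.getD p PySem.Set.empty ↔ V p x) →
    ((rest.foldl (fun d gr => gr.foldl (fun d p => d.modify p PySem.Set.empty
        (fun s => s.update (gr.filter (fun x => x ≠ p)))) d) d).keys.Nodup ∧
     (∀ p, p ∈ (rest.foldl (fun d gr => gr.foldl (fun d p => d.modify p PySem.Set.empty
        (fun s => s.update (gr.filter (fun x => x ≠ p)))) d) d).keys ↔ (K p ∨ ∃ g ∈ rest, p ∈ g)) ∧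
     (∀ p, ((rest.foldl (fun d gr => gr.foldl (fun d p => d.modify p PySem.Set.empty
        (fun s => s.update (gr.filter (fun x => x ≠ p)))) d) d).getD p PySem.Set.empty).Nodup) ∧
     (∀ p x, x ∈ (rest.foldl (fun d gr => gr.foldl (fun d p => d.modify p PySem.Set.empty
        (fun s => s.update (gr.filter (fun x => x ≠ p)))) d) d).getD p PySem.Set.empty ↔
        (V p x ∨ ∃ g ∈ rest, p ∈ g ∧ x ∈ g ∧ x ≠ p))) := by
  intro rest
  induction rest with
  | nil =>
    intro d K V h1 h2 h3 h4
    refine ⟨h1, fun p => ?_, h3, fun p x => ?_⟩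
    · simp only [List.foldl_nil]; rw [h2 p]; simp
    · simp only [List.foldl_nil]; rw [h4 p x]; simp
  | cons g rest ih =>
    intro d K V h1 h2 h3 h4
    simp only [List.foldl_cons]
    obtain ⟨k1, k2, k3, k4⟩ := B_inner g g d K V h1 h2 h3 h4
    obtain ⟨r1, r2, r3, r4⟩ := ih _ _ _ k1 k2 k3 k4
    refine ⟨r1, fun p => ?_, r3, fun p x => ?_⟩
    · rw [r2 p]
      simp only [List.mem_cons]
      constructor
      · rintro ((hk | hp) | ⟨g', hg', hp⟩)
        · exact Or.inl hk
        · exact Or.inr ⟨g, Or.inl rfl, hp⟩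
        · exact Or.inr ⟨g', Or.inr hg', hp⟩
      · rintro (hk | ⟨g', (rfl | hg'), hp⟩)
        · exact Or.inl (Or.inl hk)
        · exact Or.inl (Or.inr hp)
        · exact Or.inr ⟨g', hg', hp⟩
    · rw [r4 p x]
      simp only [List.mem_cons]
      constructor
      · rintro ((hv | ⟨hp, hx, hne⟩) | ⟨g', hg', hp, hx, hne⟩)
        · exact Or.inl hv
        · exact Or.inr ⟨g, Or.inl rfl, hp, hx, hne⟩
        · exact Or.inr ⟨g', Or.inr hg', hp, hx, hne⟩
      · rintro (hv | ⟨g', (rfl | hg'), hp, hx, hne⟩)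
        · exact Or.inl (Or.inl hv)
        · exact Or.inl (Or.inr ⟨hp, hx, hne⟩)
        · exact Or.inr ⟨g', hg', hp, hx, hne⟩

-- ---- counts agree ----
theorem cnt_eq (sk : List (List String)) (d : PySem.Dict String (PySem.Set String))
    (hnd : ∀ p, (d.getD p PySem.Set.empty).Nodup)
    (hmem : ∀ p x, x ∈ d.getD p PySem.Set.empty ↔ pvAdj sk p x) (p : String) :
    PySem.Set.len (d.getD p PySem.Set.empty) = pvCnt sk p := by
  obtain ⟨hn, hm⟩ := okuzeni_spec sk p
  have hperm : (d.getD p PySem.Set.empty).Perm (okuzeni sk (PySem.Set.ofList [p])) :=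
    (List.perm_ext_iff_of_nodup (hnd p) hn).mpr (fun a => by rw [hmem p a, hm a])
  unfold pvCnt
  rw [PySem.Set.len_eq, PySem.Set.len_eq, hperm.length_eq]

-- ---- A's vsi / slov ----
theorem nodup_foldl_add : ∀ (g : List String) (s : PySem.Set String), s.Nodup →
    (g.foldl (fun vsi ljudi => vsi.add ljudi) s).Nodup := by
  intro g
  induction g with
  | nil => intro s h; exact h
  | cons a g ih => intro s h; exact ih _ (PySem.Set.nodup_add s a h)

theorem vsi_spec (sk : List (List String)) : ∀ s : PySem.Set String, s.Nodup →
    (sk.foldl (fun vsi manj_skup => manj_skup.foldl (fun vsi ljudi => vsi.add ljudi) vsi) s).Nodup ∧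
    ∀ p, p ∈ sk.foldl (fun vsi manj_skup => manj_skup.foldl (fun vsi ljudi => vsi.add ljudi) vsi) s ↔
      (p ∈ s ∨ ∃ g ∈ sk, p ∈ g) := by
  induction sk with
  | nil => intro s h; exact ⟨h, fun p => by simp⟩
  | cons g sk ih =>
    intro s h
    simp only [List.foldl_cons]
    obtain ⟨r1, r2⟩ := ih _ (nodup_foldl_add g s h)
    refine ⟨r1, fun p => ?_⟩
    rw [r2 p, PySem.Set.mem_foldl_add g (fun b => b) s p]
    simp only [List.mem_cons]
    constructor
    · rintro ((hs | ⟨b, hb, rfl⟩) | ⟨g', hg', hp⟩)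
      · exact Or.inl hs
      · exact Or.inr ⟨g, Or.inl rfl, hb⟩
      · exact Or.inr ⟨g', Or.inr hg', hp⟩
    · rintro (hs | ⟨g', (rfl | hg'), hp⟩)
      · exact Or.inl (Or.inl hs)
      · exact Or.inl (Or.inr ⟨p, hp, rfl⟩)
      · exact Or.inr ⟨g', hg', hp⟩

theorem slov_getD (f : String → Int) : ∀ (xs : List String) (d : PySem.Dict String Int) (x : String),
    (xs.foldl (fun d p => d.insert p (f p)) d).getD x 0 =
      (if x ∈ xs then f x else d.getD x 0) := by
  intro xs
  induction xs with
  | nil => intro d x; simp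
  | cons a xs ih =>
    intro d x
    simp only [List.foldl_cons]
    rw [ih]
    by_cases hx : x ∈ xs
    · simp [hx, List.mem_cons]
    · rw [if_neg hx]
      rcases eq_or_ne x a with rfl | hne
      · rw [PySem.Dict.getD_insert_self]; simp [List.mem_cons]
      · rw [PySem.Dict.getD_insert_of_ne _ _ _ hne]
        simp [List.mem_cons, hne, hx]

-- ---- A's running-max loop ----
theorem foldl_max_le (c : String → Int) : ∀ (xs : List String) (m : Int),
    m ≤ xs.foldl (fun a p => max a (c p)) m := by
  intro xs
  induction xs with
  | nil => intro m; exact le_refl m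
  | cons a xs ih =>
    intro m
    simp only [List.foldl_cons]
    exact le_trans (le_max_left m (c a)) (ih (max m (c a)))

theorem foldl_max_bound (c : String → Int) : ∀ (xs : List String) (m : Int) (x : String),
    x ∈ xs → c x ≤ xs.foldl (fun a p => max a (c p)) m := by
  intro xs
  induction xs with
  | nil => intro m x h; simp at h
  | cons a xs ih =>
    intro m x h
    simp only [List.foldl_cons]
    rcases List.mem_cons.mp h with rfl | hx
    · exact le_trans (le_max_right m (c x)) (foldl_max_le c xs (max m (c x)))
    · exact ih (max m (c a)) x hx

theorem foldl_max_attained (c : String → Int) : ∀ (xs : List String) (m : Int),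
    xs.foldl (fun a p => max a (c p)) m = m ∨
    ∃ x ∈ xs, xs.foldl (fun a p => max a (c p)) m = c x := by
  intro xs
  induction xs with
  | nil => intro m; exact Or.inl rfl
  | cons a xs ih =>
    intro m
    simp only [List.foldl_cons]
    rcases ih (max m (c a)) with h | ⟨x, hx, h⟩
    · rcases max_choice m (c a) with hm | hm
      · exact Or.inl (h.trans hm)
      · exact Or.inr ⟨a, List.mem_cons_self .., h.trans hm⟩
    · exact Or.inr ⟨x, List.mem_cons_of_mem a hx, h⟩

theorem loopA (c : String → Int) : ∀ (xs : List String) (m : Int) (idx : List String),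
    xs.foldl (fun (st : Int × List String) x =>
        if c x > st.1 then (c x, [x])
        else if c x = st.1 then (st.1, st.2 ++ [x])
        else st) (m, idx)
    = (xs.foldl (fun a p => max a (c p)) m,
       if xs.foldl (fun a p => max a (c p)) m = m then
         idx ++ xs.filter (fun p => decide (c p = xs.foldl (fun a p => max a (c p)) m))
       else xs.filter (fun p => decide (c p = xs.foldl (fun a p => max a (c p)) m))) := by
  intro xs
  induction xs with
  | nil => intro m idx; simp
  | cons a xs ih =>
    intro m idx
    simp only [List.foldl_cons]
    by_cases h1 : c a > m
    · rw [if_pos h1, ih (c a) [a]]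
      have hmax : max m (c a) = c a := by omega
      simp only [hmax]
      have hge : c a ≤ xs.foldl (fun a p => max a (c p)) (c a) := foldl_max_le c xs (c a)
      have hMne : xs.foldl (fun a p => max a (c p)) (c a) ≠ m := by omega
      rw [if_neg hMne]
      by_cases h2 : xs.foldl (fun a p => max a (c p)) (c a) = c a
      · rw [if_pos h2]
        have hda : c a = xs.foldl (fun a p => max a (c p)) (c a) := h2.symm
        rw [List.filter_cons_of_pos (by simp [← hda])]
        simp
      · rw [if_neg h2]
        have hda : ¬ (c a = xs.foldl (fun a p => max a (c p)) (c a)) := fun hh => h2 hh.symm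
        simp [hda]
    · by_cases h2 : c a = m
      · rw [if_neg h1, if_pos h2, ih m (idx ++ [a])]
        have hmax : max m (c a) = m := by omega
        simp only [hmax]
        by_cases h3 : xs.foldl (fun a p => max a (c p)) m = m
        · rw [if_pos h3, if_pos h3]
          have hda : c a = xs.foldl (fun a p => max a (c p)) m := by omega
          simp [hda, List.append_assoc]
        · rw [if_neg h3, if_neg h3]
          have hda : ¬ (c a = xs.foldl (fun a p => max a (c p)) m) := by omega
          simp [hda]
      · rw [if_neg h1, if_neg h2, ih m idx]
        have hmax : max m (c a) = m := by omega
        simp only [hmax]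
        have hge : m ≤ xs.foldl (fun a p => max a (c p)) m := foldl_max_le c xs m
        have hda : ¬ (c a = xs.foldl (fun a p => max a (c p)) m) := by omega
        simp [hda]

-- ---- B's keyed min ----
theorem pvLex_trans {α : Type} (k1 : α → Int) (k2 : α → String) {a b c : α}
    (h1 : k1 a < k1 b ∨ (k1 a = k1 b ∧ k2 a ≤ k2 b))
    (h2 : k1 b < k1 c ∨ (k1 b = k1 c ∧ k2 b ≤ k2 c)) :
    k1 a < k1 c ∨ (k1 a = k1 c ∧ k2 a ≤ k2 c) := by
  rcases h1 with h1 | ⟨e1, l1⟩ <;> rcases h2 with h2 | ⟨e2, l2⟩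
  · exact Or.inl (lt_trans h1 h2)
  · exact Or.inl (e2 ▸ h1)
  · exact Or.inl (e1 ▸ h2)
  · exact Or.inr ⟨e1.trans e2, le_trans l1 l2⟩

theorem min2_go {α : Type} (k1 : α → Int) (k2 : α → String) :
    ∀ (xs : List α) (m : α), ∃ r,
      xs.foldl (fun acc x => match acc with
        | none => some x
        | some m => if (decide (k1 x < k1 m) || !decide (k1 m < k1 x) && decide (k2 x < k2 m)) = true
                    then some x else some m) (some m) = some r ∧
      (r = m ∨ r ∈ xs) ∧
      ∀ q, (q = m ∨ q ∈ xs) → (k1 r < k1 q ∨ (k1 r = k1 q ∧ k2 r ≤ k2 q)) := by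
  intro xs
  induction xs with
  | nil =>
    intro m
    refine ⟨m, rfl, Or.inl rfl, fun q hq => ?_⟩
    rcases hq with rfl | hq
    · exact Or.inr ⟨rfl, le_refl _⟩
    · simp at hq
  | cons x xs ih =>
    intro m
    simp only [List.foldl_cons]
    by_cases hc : (decide (k1 x < k1 m) || !decide (k1 m < k1 x) && decide (k2 x < k2 m)) = true
    · have hxm : k1 x < k1 m ∨ (k1 x = k1 m ∧ k2 x ≤ k2 m) := by
        simp only [Bool.or_eq_true, Bool.and_eq_true, Bool.not_eq_true',
          decide_eq_true_eq, decide_eq_false_iff_not] at hc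
        rcases hc with hlt | ⟨hnl, hk2⟩
        · exact Or.inl hlt
        · rcases lt_or_eq_of_le (by omega : k1 x ≤ k1 m) with hlt | heq
          · exact Or.inl hlt
          · exact Or.inr ⟨heq, le_of_lt hk2⟩
      obtain ⟨r, hfold, hmem, hmin⟩ := ih x
      rw [if_pos hc]
      refine ⟨r, hfold, ?_, ?_⟩
      · rcases hmem with rfl | hr
        · exact Or.inr (List.mem_cons_self ..)
        · exact Or.inr (List.mem_cons_of_mem x hr)
      · intro q hq
        rcases hq with rfl | hq
        · exact pvLex_trans k1 k2 (hmin x (Or.inl rfl)) hxm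
        · rcases List.mem_cons.mp hq with rfl | hq2
          · exact hmin q (Or.inl rfl)
          · exact hmin q (Or.inr hq2)
    · have hmx : k1 m < k1 x ∨ (k1 m = k1 x ∧ k2 m ≤ k2 x) := by
        rcases lt_trichotomy (k1 m) (k1 x) with hlt | heq | hgt
        · exact Or.inl hlt
        · refine Or.inr ⟨heq, ?_⟩
          by_contra hle
          apply hc
          simp only [Bool.or_eq_true, Bool.and_eq_true, Bool.not_eq_true',
            decide_eq_true_eq, decide_eq_false_iff_not]
          exact Or.inr ⟨by omega, lt_of_not_ge hle⟩
        · exfalso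
          apply hc
          simp only [Bool.or_eq_true, Bool.and_eq_true, Bool.not_eq_true',
            decide_eq_true_eq, decide_eq_false_iff_not]
          exact Or.inl hgt
      obtain ⟨r, hfold, hmem, hmin⟩ := ih m
      rw [if_neg hc]
      refine ⟨r, hfold, ?_, ?_⟩
      · rcases hmem with rfl | hr
        · exact Or.inl rfl
        · exact Or.inr (List.mem_cons_of_mem x hr)
      · intro q hq
        rcases hq with rfl | hq
        · exact hmin q (Or.inl rfl)
        · rcases List.mem_cons.mp hq with rfl | hq2
          · exact pvLex_trans k1 k2 (hmin m (Or.inl rfl)) hmx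
          · exact hmin q (Or.inr hq2)

-- ---- results of each port ----
theorem A_best (sk : List (List String)) (h : Pre_zlati_prinasalec sk) :
    pvBest sk (zlati_prinasalec sk) := by
  obtain ⟨g0, hg0, hne0⟩ := h
  obtain ⟨hvn, hvm⟩ := vsi_spec sk PySem.Set.empty List.nodup_nil
  unfold zlati_prinasalec
  dsimp only
  set vsi := sk.foldl (fun vsi manj_skup =>
    manj_skup.foldl (fun vsi ljudi => vsi.add ljudi) vsi) PySem.Set.empty with hvsi
  set slov := vsi.foldl (fun d oseba =>
    d.insert oseba (PySem.Set.len (okuzeni sk (PySem.Set.ofList [oseba])))) PySem.Dict.empty with hslov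
  have hvmem : ∀ p, p ∈ vsi ↔ pvOccurs sk p := by
    intro p; rw [hvm p]; unfold pvOccurs; simp [PySem.Set.empty]
  have hkeys : slov.keys = vsi := by
    rw [hslov, PySem.Dict.keys_foldl_insert vsi
      (fun d oseba => PySem.Set.len (okuzeni sk (PySem.Set.ofList [oseba]))) PySem.Dict.empty]
    rw [PySem.Dict.keys_empty, PySem.Set.update_nil_left]
    exact PySem.Set.ofList_eq_self_of_nodup _ hvn
  have hcg : ∀ x, x ∈ vsi → slov.getD x 0 = pvCnt sk x := by
    intro x hx
    rw [hslov, slov_getD (fun oseba => PySem.Set.len (okuzeni sk (PySem.Set.ofList [oseba])))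
      vsi PySem.Dict.empty x, if_pos hx]
    rfl
  rw [hkeys, loopA (fun x => slov.getD x 0) vsi 0 []]
  dsimp only
  simp only [List.nil_append, ite_self]
  have hnn : ∀ q ∈ vsi, 0 ≤ slov.getD q 0 := by
    intro q hq; rw [hcg q hq]; unfold pvCnt; rw [PySem.Set.len_eq]
    exact Int.natCast_nonneg _
  have hbound : ∀ q ∈ vsi, slov.getD q 0 ≤ vsi.foldl (fun a p => max a (slov.getD p 0)) 0 :=
    fun q hq => foldl_max_bound (fun x => slov.getD x 0) vsi 0 q hq
  have hp1 : ∃ p ∈ vsi, slov.getD p 0 = vsi.foldl (fun a p => max a (slov.getD p 0)) 0 := by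
    rcases foldl_max_attained (fun x => slov.getD x 0) vsi 0 with h0 | hx
    · obtain ⟨q1, hq1⟩ := List.exists_mem_of_ne_nil g0 hne0
      have hq1v : q1 ∈ vsi := (hvmem q1).mpr ⟨g0, hg0, hq1⟩
      refine ⟨q1, hq1v, le_antisymm (hbound q1 hq1v) ?_⟩
      rw [h0]; exact hnn q1 hq1v
    · obtain ⟨x, hx1, hx2⟩ := hx; exact ⟨x, hx1, hx2.symm⟩
  obtain ⟨p1, hp1v, hp1M⟩ := hp1
  have hFne : vsi.filter (fun p =>
      decide (slov.getD p 0 = vsi.foldl (fun a p => max a (slov.getD p 0)) 0)) ≠ [] := by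
    have hmem : p1 ∈ vsi.filter (fun p =>
        decide (slov.getD p 0 = vsi.foldl (fun a p => max a (slov.getD p 0)) 0)) :=
      List.mem_filter.mpr ⟨hp1v, by simp [hp1M]⟩
    exact List.ne_nil_of_mem hmem
  rcases hsort : PySem.List.sorted (vsi.filter (fun p =>
      decide (slov.getD p 0 = vsi.foldl (fun a p => max a (slov.getD p 0)) 0)))
      (fun s => s) false with _ | ⟨r, t⟩
  · exact absurd ((PySem.List.sorted_eq_nil_iff _ _ _).mp hsort) hFne
  rw [PySem.List.pyGet?_zero_cons]
  simp only [Option.getD_some]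
  have hrF : r ∈ vsi.filter (fun p =>
      decide (slov.getD p 0 = vsi.foldl (fun a p => max a (slov.getD p 0)) 0)) := by
    rw [← PySem.List.mem_sorted _ (fun s : String => s) false, hsort]
    exact List.mem_cons_self ..
  have hrv : r ∈ vsi := (List.mem_filter.mp hrF).1
  have hrM : slov.getD r 0 = vsi.foldl (fun a p => max a (slov.getD p 0)) 0 := by
    have := (List.mem_filter.mp hrF).2; simpa using this
  refine ⟨(hvmem r).mp hrv, fun q hq => ?_⟩
  have hqv : q ∈ vsi := (hvmem q).mpr hq
  rcases lt_or_eq_of_le (hbound q hqv) with hlt | heq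
  · left; rw [← hcg q hqv, ← hcg r hrv]; omega
  · right
    refine ⟨by rw [← hcg q hqv, ← hcg r hrv]; omega, ?_⟩
    have hqF : q ∈ vsi.filter (fun p =>
        decide (slov.getD p 0 = vsi.foldl (fun a p => max a (slov.getD p 0)) 0)) :=
      List.mem_filter.mpr ⟨hqv, by simp [heq]⟩
    exact PySem.List.key_head_sorted_le _ (fun s => s) hsort q hqF

theorem B_best (sk : List (List String)) (h : Pre_zlati_prinasalec sk) :
    pvBest sk (zlati_prinasalec_alt sk) := by
  obtain ⟨g0, hg0, hne0⟩ := h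
  have hd0 : (PySem.Dict.empty : PySem.Dict String (PySem.Set String)).keys.Nodup := by
    rw [PySem.Dict.keys_empty]; exact List.nodup_nil
  obtain ⟨hkn, hkm, hvnd, hvmm⟩ := B_outer sk PySem.Dict.empty (fun _ => False) (fun _ _ => False)
    hd0 (fun p => by rw [PySem.Dict.keys_empty]; simp)
    (fun p => by rw [PySem.Dict.getD_empty]; exact List.nodup_nil)
    (fun p x => by rw [PySem.Dict.getD_empty]; simp [PySem.Set.empty])
  unfold zlati_prinasalec_alt
  dsimp only
  set neigh := sk.foldl (fun d gr => gr.foldl (fun d p => d.modify p PySem.Set.empty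
    (fun s => s.update (gr.filter (fun x => x ≠ p)))) d) PySem.Dict.empty with hneigh
  have hkeym : ∀ p, p ∈ neigh.keys ↔ pvOccurs sk p := by
    intro p; rw [hkm p]; unfold pvOccurs; simp
  have hadj : ∀ p x, x ∈ neigh.getD p PySem.Set.empty ↔ pvAdj sk p x := by
    intro p x; rw [hvmm p x]; unfold pvAdj
    constructor
    · rintro (hf | ⟨g, hg, hp, hx, hne⟩)
      · exact hf.elim
      · exact ⟨hne, g, hg, hp, hx⟩
    · rintro ⟨hne, g, hg, hp, hx⟩
      exact Or.inr ⟨g, hg, hp, hx, hne⟩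
  have hcnt : ∀ p, PySem.Set.len (neigh.getD p PySem.Set.empty) = pvCnt sk p :=
    cnt_eq sk neigh hvnd hadj
  obtain ⟨q1, hq1⟩ := List.exists_mem_of_ne_nil g0 hne0
  have hq1k : q1 ∈ neigh.keys := (hkeym q1).mpr ⟨g0, hg0, hq1⟩
  rcases hks : neigh.keys with _ | ⟨y, t⟩
  · rw [hks] at hq1k; simp at hq1k
  obtain ⟨r, hfold, hmem, hmin⟩ :=
    min2_go (fun p => -(PySem.Set.len (neigh.getD p PySem.Set.empty))) (fun p => p) t y
  have hmin2 : PySem.List.min2? (y :: t)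
      (fun p => -(PySem.Set.len (neigh.getD p PySem.Set.empty))) (fun p => p) = some r := by
    simp only [PySem.List.min2?, List.foldl_cons]
    exact hfold
  rw [hmin2]
  simp only [Option.getD_some]
  have hrk : r ∈ neigh.keys := by
    rw [hks]
    rcases hmem with rfl | hr
    · exact List.mem_cons_self ..
    · exact List.mem_cons_of_mem y hr
  refine ⟨(hkeym r).mp hrk, fun q hq => ?_⟩
  have hqk : q ∈ neigh.keys := (hkeym q).mpr hq
  have hq' : q = y ∨ q ∈ t := by rw [hks] at hqk; exact List.mem_cons.mp hqk
  rcases hmin q hq' with hlt | ⟨heq, hle⟩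
  · left
    rw [hcnt q, hcnt r] at hlt
    omega
  · right
    rw [hcnt q, hcnt r] at heq
    exact ⟨by omega, hle⟩

-- ===== VERDICT (by name: the statement is the Claim_ definition above) =====
theorem zlati_prinasalec_spec : Claim_equal_zlati_prinasalec := by
  intro sk _ hpre
  exact pvBest_unique sk _ _ (A_best sk hpre) (B_best sk hpre)
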